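-- pv_equiv track=rewrite | github.com/PetrPrazak/AdventOfCode | 2019/17/aoc2019_17.py | walk_map
-- ===== SOURCE A (Python) =====
-- def get_next_pos(pos, direction):
--     dpos = [(0, -1), (1, 0), (0, 1), (-1, 0)][direction]
--     return pos[0] + dpos[0], pos[1] + dpos[1]
--
-- def walk_map(grid, start_pos, direction=0):
--     out = []
--     while True:
--         where = [('R', (direction + 1) % 4), ('L', (direction + 3) % 4)]
--         possible = [(pos, next_dir, turn) for turn, next_dir in where
--                     for pos in [get_next_pos(start_pos, next_dir)] if pos in grid]
--         if not possible:
--             return out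
--         nextpos, direction, turn = possible[0]
--         peek = get_next_pos(nextpos, direction)
--         while peek in grid:
--             nextpos = peek
--             peek = get_next_pos(nextpos, direction)
--         steps = max(abs(nextpos[0] - start_pos[0]), abs(nextpos[1] - start_pos[1]))
--         cmd = f"{turn}{steps}"
--         out.append(cmd)
--         start_pos = nextpos
-- ===== SOURCE B (Python) =====
-- def get_next_pos(pos, direction):
--     dpos = [(0, -1), (1, 0), (0, 1), (-1, 0)][direction]
--     return pos[0] + dpos[0], pos[1] + dpos[1]
--
-- def walk_map(grid, start_pos, direction=0):
--     # pass 1: walk the scaffold one cell at a time, recording each cell's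
--     # direction in a flat list (turning R before L, stepping straight while possible)
--     dirs = []
--     pos, d = start_pos, direction
--     while True:
--         if get_next_pos(pos, (d + 1) % 4) in grid:
--             d = (d + 1) % 4
--         elif get_next_pos(pos, (d + 3) % 4) in grid:
--             d = (d + 3) % 4
--         else:
--             break
--         while True:
--             pos = get_next_pos(pos, d)
--             dirs.append(d)
--             if get_next_pos(pos, d) not in grid:
--                 break
--     # pass 2: run-length-encode the direction list into movement commands
--     out = []
--     i = 0
--     prev = direction
--     while i < len(dirs):
--         j = i
--         while j < len(dirs) and dirs[j] == dirs[i]: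
--             j += 1
--         turn = 'R' if dirs[i] == (prev + 1) % 4 else 'L'
--         out.append(f"{turn}{j - i}")
--         prev = dirs[i]
--         i = j
--     return out
-- ===== Notes on version B (the rewrite author's own statement) =====
-- stated objective: alternative
-- what changed: A's interleaved turn/maximal-peek-advance/Chebyshev-distance loop is replaced by a build-then-compress decomposition: a single-cell-step walk first produces a flat list of per-cell directions, and a separate second pass run-length-encodes that list into the turn+steps commands.
import Mathlib
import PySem

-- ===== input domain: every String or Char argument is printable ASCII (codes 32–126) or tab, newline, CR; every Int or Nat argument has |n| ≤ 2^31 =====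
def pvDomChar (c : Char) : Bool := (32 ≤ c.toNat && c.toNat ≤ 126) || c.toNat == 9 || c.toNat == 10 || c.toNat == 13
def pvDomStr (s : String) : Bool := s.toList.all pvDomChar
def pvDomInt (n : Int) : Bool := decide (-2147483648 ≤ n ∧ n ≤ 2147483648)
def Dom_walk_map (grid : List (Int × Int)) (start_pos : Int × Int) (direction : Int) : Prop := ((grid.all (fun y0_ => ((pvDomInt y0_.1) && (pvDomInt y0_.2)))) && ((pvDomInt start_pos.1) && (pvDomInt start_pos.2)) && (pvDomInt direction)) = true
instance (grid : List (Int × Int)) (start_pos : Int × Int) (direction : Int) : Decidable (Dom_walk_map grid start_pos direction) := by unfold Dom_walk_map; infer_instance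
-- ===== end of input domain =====

-- B replaces A's interleaved turn / maximal-peek-advance / Chebyshev-distance loop by a
-- build-then-compress decomposition: a single-cell-step walk producing a flat list of
-- per-cell directions, then a separate run-length-encoding pass producing the commands
-- (objective: alternative decomposition, same cost).
-- Both Pythons loop forever on grids containing a rectilinear cycle the walker enters;
-- both ports are totalized with the SAME fuel (4*|grid|+1 turns — enough for every
-- terminating run, since a terminating walk never repeats a (cell, direction) state),
-- so the equality theorem covers ALL inputs, fuel-truncated ones included.

-- ===== PORT A =====
-- exact for direction ∈ [0,4): the only values either Python ever passes here
-- (Python's list index would raise IndexError outside; the .getD default is unreachable)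
def get_next_pos (pos : Int × Int) (direction : Int) : Int × Int :=
  let dpos := (PySem.List.pyGet? ([(0, -1), (1, 0), (0, 1), (-1, 0)] : List (Int × Int)) direction).getD (0, 0)
  (pos.1 + dpos.1, pos.2 + dpos.2)

-- A's inner 'while peek in grid' loop (fuel = |grid| never runs out in a real run:
-- each extension consumes a distinct grid cell)
def walkInner (grid : List (Int × Int)) (nextpos : Int × Int) (direction : Int) : Nat → Int × Int
  | 0 => nextpos
  | fuel + 1 =>
    let peek := get_next_pos nextpos direction
    if peek ∈ grid then walkInner grid peek direction fuel else nextpos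

-- A's outer 'while True' loop, with the 'out' accumulator and fuel
def walkA (grid : List (Int × Int)) : Nat → (Int × Int) → Int → List String → List String
  | 0, _, _, out => out
  | fuel + 1, start_pos, direction, out =>
    let wh : List (String × Int) :=
      [("R", PySem.Int.mod (direction + 1) 4), ("L", PySem.Int.mod (direction + 3) 4)]
    let possible : List ((Int × Int) × Int × String) :=
      wh.flatMap (fun td =>
        let p := get_next_pos start_pos td.2
        if p ∈ grid then [(p, td.2, td.1)] else [])
    match possible with
    | [] => out
    | (nextpos0, nd, turn) :: _ =>
      let nextpos := walkInner grid nextpos0 nd grid.length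
      let steps : Int := max |nextpos.1 - start_pos.1| |nextpos.2 - start_pos.2|
      let cmd := turn ++ PySem.Int.toStr steps
      walkA grid fuel nextpos nd (out ++ [cmd])

def walk_map (grid : List (Int × Int)) (start_pos : Int × Int) (direction : Int) : List String :=
  walkA grid (4 * grid.length + 1) start_pos direction []

-- ===== PORT B =====
-- Source B's inner 'while True: step; append; break if blocked' loop: the final position
-- and the directions appended for this run (fuel |grid|+1 covers any real run)
def runSteps (grid : List (Int × Int)) (pos : Int × Int) (d : Int) : Nat → (Int × Int) × List Int
  | 0 => (pos, [])
  | fuel + 1 =>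
    let p := get_next_pos pos d
    if get_next_pos p d ∈ grid then
      ((runSteps grid p d fuel).1, d :: (runSteps grid p d fuel).2)
    else (p, [d])

-- Source B's pass 1: turn (R before L), then single-step; the flat per-cell direction list
def pass1 (grid : List (Int × Int)) : Nat → (Int × Int) → Int → List Int
  | 0, _, _ => []
  | fuel + 1, pos, d =>
    if get_next_pos pos (PySem.Int.mod (d + 1) 4) ∈ grid then
      (runSteps grid pos (PySem.Int.mod (d + 1) 4) (grid.length + 1)).2 ++
        pass1 grid fuel (runSteps grid pos (PySem.Int.mod (d + 1) 4) (grid.length + 1)).1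
          (PySem.Int.mod (d + 1) 4)
    else if get_next_pos pos (PySem.Int.mod (d + 3) 4) ∈ grid then
      (runSteps grid pos (PySem.Int.mod (d + 3) 4) (grid.length + 1)).2 ++
        pass1 grid fuel (runSteps grid pos (PySem.Int.mod (d + 3) 4) (grid.length + 1)).1
          (PySem.Int.mod (d + 3) 4)
    else []

-- Source B's inner 'while j < len(dirs) and dirs[j] == dirs[i]' scan: run length and remainder
def splitRun (d : Int) : List Int → Nat × List Int
  | [] => (0, [])
  | x :: xs => if x = d then ((splitRun d xs).1 + 1, (splitRun d xs).2) else (0, x :: xs)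

-- termination measure for rle (cited by its decreasing_by)
theorem splitRun_len_le (d : Int) : ∀ xs : List Int, (splitRun d xs).2.length ≤ xs.length
  | [] => Nat.le_refl _
  | x :: xs => by
    by_cases h : x = d
    · simp only [splitRun, h]
      exact Nat.le_succ_of_le (splitRun_len_le d xs)
    · simp [splitRun, h]

-- Source B's pass 2: run-length-encode the direction list into commands
def rle (prev : Int) (l : List Int) : List String :=
  match l with
  | [] => []
  | d :: rest =>
    let turn := if d = PySem.Int.mod (prev + 1) 4 then "R" else "L"
    (turn ++ PySem.Int.toStr ((splitRun d rest).1 + 1)) :: rle d (splitRun d rest).2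
termination_by l.length
decreasing_by
  simpa using Nat.lt_succ_of_le (splitRun_len_le d rest)

def walk_map_alt (grid : List (Int × Int)) (start_pos : Int × Int) (direction : Int) : List String :=
  rle direction (pass1 grid (4 * grid.length + 1) start_pos direction)

-- ===== PRECONDITION & SPEC =====
def Spec_walk_map (grid : List (Int × Int)) (start_pos : Int × Int) (direction : Int) (out : List String) : Prop := out = walk_map_alt grid start_pos direction
instance (grid : List (Int × Int)) (start_pos : Int × Int) (direction : Int) (out : List String) : Decidable (Spec_walk_map grid start_pos direction out) := by unfold Spec_walk_map; infer_instance

-- ===== CLAIM (what is proved, stated in full; the proofs are below) =====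
def Claim_equal_walk_map : Prop := ∀ (grid : List (Int × Int)) (start_pos : Int × Int) (direction : Int), Dom_walk_map grid start_pos direction → Spec_walk_map grid start_pos direction (walk_map grid start_pos direction)

-- ===== LEMMAS AND PROOFS =====

theorem mod4_bounds (x : Int) : 0 ≤ PySem.Int.mod x 4 ∧ PySem.Int.mod x 4 < 4 := by
  rw [PySem.Int.mod_eq_emod_of_pos (by norm_num)]
  omega

theorem modR_ne (d : Int) : PySem.Int.mod (d + 1) 4 ≠ d := by
  rw [PySem.Int.mod_eq_emod_of_pos (by norm_num)]
  omega

theorem modL_ne (d : Int) : PySem.Int.mod (d + 3) 4 ≠ d := by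
  rw [PySem.Int.mod_eq_emod_of_pos (by norm_num)]
  omega

theorem modL_ne_modR (d : Int) : PySem.Int.mod (d + 3) 4 ≠ PySem.Int.mod (d + 1) 4 := by
  rw [PySem.Int.mod_eq_emod_of_pos (by norm_num), PySem.Int.mod_eq_emod_of_pos (by norm_num)]
  omega

-- one step moves by the direction's unit vector
theorem gn_add (pos : Int × Int) (d : Int) (h0 : 0 ≤ d) (h4 : d < 4) :
    get_next_pos pos d = (pos.1 + (get_next_pos (0, 0) d).1, pos.2 + (get_next_pos (0, 0) d).2) := by
  interval_cases d <;> simp [get_next_pos, PySem.List.pyGet?, PySem.List.pyIdx?]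

-- everything about one straight run of B's pass 1, against A's walkInner
theorem run_spec (grid : List (Int × Int)) (d : Int) (h0 : 0 ≤ d) (h4 : d < 4) :
    ∀ (m : Nat) (pos : Int × Int),
      (runSteps grid pos d (m + 1)).2 = List.replicate (runSteps grid pos d (m + 1)).2.length d
      ∧ 1 ≤ (runSteps grid pos d (m + 1)).2.length
      ∧ (runSteps grid pos d (m + 1)).1 = walkInner grid (get_next_pos pos d) d m
      ∧ (runSteps grid pos d (m + 1)).1.1
          = pos.1 + ((runSteps grid pos d (m + 1)).2.length : Int) * (get_next_pos (0, 0) d).1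
      ∧ (runSteps grid pos d (m + 1)).1.2
          = pos.2 + ((runSteps grid pos d (m + 1)).2.length : Int) * (get_next_pos (0, 0) d).2 := by
  intro m
  induction m with
  | zero =>
    intro pos
    simp only [runSteps, walkInner]
    split
    · simp [gn_add pos d h0 h4]
    · simp [gn_add pos d h0 h4]
  | succ n ih =>
    intro pos
    have hdef : runSteps grid pos d (n + 1 + 1) =
        (if get_next_pos (get_next_pos pos d) d ∈ grid then
          ((runSteps grid (get_next_pos pos d) d (n + 1)).1,
            d :: (runSteps grid (get_next_pos pos d) d (n + 1)).2)
        else (get_next_pos pos d, [d])) := rfl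
    have hwdef : walkInner grid (get_next_pos pos d) d (n + 1) =
        (if get_next_pos (get_next_pos pos d) d ∈ grid then
          walkInner grid (get_next_pos (get_next_pos pos d) d) d n
        else get_next_pos pos d) := rfl
    by_cases hmem : get_next_pos (get_next_pos pos d) d ∈ grid
    · obtain ⟨hrep, hlen, hend, hx, hy⟩ := ih (get_next_pos pos d)
      rw [hdef, hwdef, if_pos hmem, if_pos hmem]
      refine ⟨?_, by simp, ?_, ?_, ?_⟩
      · simp only [List.length_cons, List.replicate_succ]
        exact congrArg (List.cons d) hrep
      · exact hend
      · simp only [List.length_cons]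
        push_cast
        rw [hx, gn_add pos d h0 h4]
        ring
      · simp only [List.length_cons]
        push_cast
        rw [hy, gn_add pos d h0 h4]
        ring
    · rw [hdef, hwdef, if_neg hmem, if_neg hmem]
      simp [gn_add pos d h0 h4]

-- A's step count (Chebyshev distance) is B's run length
theorem steps_eq (pos q : Int × Int) (d : Int) (h0 : 0 ≤ d) (h4 : d < 4) (k : Nat) (hk : 1 ≤ k)
    (h1 : q.1 = pos.1 + (k : Int) * (get_next_pos (0, 0) d).1)
    (h2 : q.2 = pos.2 + (k : Int) * (get_next_pos (0, 0) d).2) :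
    max |q.1 - pos.1| |q.2 - pos.2| = (k : Int) := by
  have hk' : (1 : Int) ≤ (k : Int) := by exact_mod_cast hk
  have hnn : (0 : Int) ≤ (k : Int) := by omega
  interval_cases d
  · rw [show get_next_pos (0, 0) (0 : Int) = (0, -1) from by decide] at h1 h2
    rw [h1, h2, show pos.1 + (k : Int) * (0 : Int) - pos.1 = 0 from by ring,
      show pos.2 + (k : Int) * (-1 : Int) - pos.2 = -(k : Int) from by ring,
      abs_zero, abs_neg, abs_of_nonneg hnn]
    exact max_eq_right (by omega)
  · rw [show get_next_pos (0, 0) (1 : Int) = (1, 0) from by decide] at h1 h2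
    rw [h1, h2, show pos.1 + (k : Int) * (1 : Int) - pos.1 = (k : Int) from by ring,
      show pos.2 + (k : Int) * (0 : Int) - pos.2 = 0 from by ring,
      abs_zero, abs_of_nonneg hnn]
    exact max_eq_left (by omega)
  · rw [show get_next_pos (0, 0) (2 : Int) = (0, 1) from by decide] at h1 h2
    rw [h1, h2, show pos.1 + (k : Int) * (0 : Int) - pos.1 = 0 from by ring,
      show pos.2 + (k : Int) * (1 : Int) - pos.2 = (k : Int) from by ring,
      abs_zero, abs_of_nonneg hnn]
    exact max_eq_right (by omega)
  · rw [show get_next_pos (0, 0) (3 : Int) = (-1, 0) from by decide] at h1 h2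
    rw [h1, h2, show pos.1 + (k : Int) * (-1 : Int) - pos.1 = -(k : Int) from by ring,
      show pos.2 + (k : Int) * (0 : Int) - pos.2 = 0 from by ring,
      abs_zero, abs_neg, abs_of_nonneg hnn]
    exact max_eq_left (by omega)

theorem splitRun_replicate (d : Int) (rest : List Int) (h : ∀ e ∈ rest.head?, e ≠ d) :
    ∀ j : Nat, splitRun d (List.replicate j d ++ rest) = (j, rest) := by
  intro j
  induction j with
  | zero =>
    cases rest with
    | nil => rfl
    | cons e t =>
      have : e ≠ d := h e rfl
      simp [splitRun, this]
  | succ n ih => simp [List.replicate_succ, splitRun, ih]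

theorem head?_of_run (grid : List (Int × Int)) (pos : Int × Int) (d : Int)
    (h0 : 0 ≤ d) (h4 : d < 4) (m : Nat) :
    ((runSteps grid pos d (m + 1)).2).head? = some d := by
  obtain ⟨hrep, hlen, -, -, -⟩ := run_spec grid d h0 h4 m pos
  obtain ⟨t, ht⟩ := Nat.exists_eq_add_of_le hlen
  rw [hrep, ht, List.replicate_add]
  simp

theorem pass1_head_ne (grid : List (Int × Int)) :
    ∀ (f : Nat) (pos : Int × Int) (d : Int), ∀ e ∈ (pass1 grid f pos d).head?, e ≠ d := by
  intro f pos d e he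
  cases f with
  | zero => simp [pass1] at he
  | succ n =>
    rw [pass1] at he
    split at he
    · rw [List.head?_append,
        head?_of_run grid pos _ (mod4_bounds (d + 1)).1 (mod4_bounds (d + 1)).2 grid.length] at he
      simp only [Option.some_or, Option.mem_some_iff] at he
      exact he ▸ modR_ne d
    · split at he
      · rw [List.head?_append,
          head?_of_run grid pos _ (mod4_bounds (d + 3)).1 (mod4_bounds (d + 3)).2 grid.length] at he
        simp only [Option.some_or, Option.mem_some_iff] at he
        exact he ▸ modL_ne d
      · simp at he

theorem compress_step (grid : List (Int × Int)) (pos : Int × Int) (prev nd : Int)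
    (h0 : 0 ≤ nd) (h4 : nd < 4) (n : Nat) :
    rle prev ((runSteps grid pos nd (grid.length + 1)).2 ++
        pass1 grid n (runSteps grid pos nd (grid.length + 1)).1 nd)
      = ((if nd = PySem.Int.mod (prev + 1) 4 then "R" else "L") ++
          PySem.Int.toStr
            (max |(walkInner grid (get_next_pos pos nd) nd grid.length).1 - pos.1|
              |(walkInner grid (get_next_pos pos nd) nd grid.length).2 - pos.2|)) ::
        rle nd (pass1 grid n (walkInner grid (get_next_pos pos nd) nd grid.length) nd) := by
  obtain ⟨hrep, hlen, hend, hx, hy⟩ := run_spec grid nd h0 h4 grid.length pos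
  have hsteps :
      max |(runSteps grid pos nd (grid.length + 1)).1.1 - pos.1|
        |(runSteps grid pos nd (grid.length + 1)).1.2 - pos.2|
      = ((runSteps grid pos nd (grid.length + 1)).2.length : Int) :=
    steps_eq pos _ nd h0 h4 _ hlen hx hy
  obtain ⟨t, ht⟩ := Nat.exists_eq_add_of_le hlen
  rw [hrep, ht, List.replicate_add, ← hend]
  simp only [List.replicate_one, List.cons_append, List.nil_append, rle]
  have hsplit := splitRun_replicate nd
    (pass1 grid n (runSteps grid pos nd (grid.length + 1)).1 nd)
    (pass1_head_ne grid n (runSteps grid pos nd (grid.length + 1)).1 nd) t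
  rw [hsplit, hsteps, ht]
  push_cast
  ring_nf

theorem main_eq (grid : List (Int × Int)) :
    ∀ (f : Nat) (pos : Int × Int) (dir : Int) (out : List String),
      walkA grid f pos dir out = out ++ rle dir (pass1 grid f pos dir) := by
  intro f
  induction f with
  | zero => intro pos dir out; simp [walkA, pass1, rle]
  | succ n ih =>
    intro pos dir out
    by_cases hR : get_next_pos pos (PySem.Int.mod (dir + 1) 4) ∈ grid
    · simp only [walkA, pass1, List.flatMap_cons, List.flatMap_nil, if_pos hR, List.append_nil,
        List.singleton_append]
      rw [compress_step grid pos dir _ (mod4_bounds (dir + 1)).1 (mod4_bounds (dir + 1)).2 n,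
        if_pos rfl, ih]
      simp
    · by_cases hL : get_next_pos pos (PySem.Int.mod (dir + 3) 4) ∈ grid
      · simp only [walkA, pass1, List.flatMap_cons, List.flatMap_nil, if_neg hR, if_pos hL,
          List.append_nil, List.nil_append]
        rw [compress_step grid pos dir _ (mod4_bounds (dir + 3)).1 (mod4_bounds (dir + 3)).2 n,
          if_neg (modL_ne_modR dir), ih]
        simp
      · simp only [walkA, pass1, List.flatMap_cons, List.flatMap_nil, if_neg hR, if_neg hL,
          List.append_nil]
        simp [rle]

-- ===== VERDICT (by name: the statement is the Claim_ definition above) =====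
theorem walk_map_spec : Claim_equal_walk_map := by
  intro grid start_pos direction _
  unfold Spec_walk_map walk_map walk_map_alt
  simpa using main_eq grid (4 * grid.length + 1) start_pos direction []
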